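-- pv_equiv track=rewrite | github.com/yonsweng/ps | programmers/42dot/b.py | solution
-- ===== SOURCE A (Python) =====
-- def solution(friends, user_id):
--     adj = {}
--     for f in friends:
--         if f[0] not in adj:
--             adj[f[0]] = set()
--         if f[1] not in adj:
--             adj[f[1]] = set()
--         adj[f[0]].add(f[1])
--         adj[f[1]].add(f[0])
--
--     # get all nodes that are 2 hops away from user_id
--     candidates = set()
--     for f in adj[user_id]:
--         for f2 in adj[f]:
--             if f2 != user_id and f2 not in adj[user_id]:
--                 candidates.add(f2)
--
--     # get all nodes that are 1 hop away from both candidates and user_id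
--     n_connects = {c: 0 for c in candidates}
--     for c in candidates:
--         for f in adj[c]:
--             if f in adj[user_id]:
--                 n_connects[c] += 1
--
--     # get max n_connects
--     max_connects = max(n_connects.values())
--
--     # get all elements that have max n_connects
--     answer = []
--     for c, n in n_connects.items():
--         if n == max_connects:
--             answer.append(c)
--
--     answer.sort()
--
--     return answer
-- ===== SOURCE B (Python) =====
-- def solution(friends, user_id):
--     adj = {}
--     for f in friends:
--         if f[0] not in adj:
--             adj[f[0]] = set()
--         if f[1] not in adj:
--             adj[f[1]] = set()
--         adj[f[0]].add(f[1])
--         adj[f[1]].add(f[0])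
--
--     # one fused pass from the user's side: discover 2-hop candidates and
--     # count mutual friends at the same time
--     counter = {}
--     for f in adj[user_id]:
--         for f2 in adj[f]:
--             if f2 != user_id and f2 not in adj[user_id]:
--                 counter[f2] = counter.get(f2, 0) + 1
--
--     max_connects = max(counter.values())
--
--     return sorted(c for c, n in counter.items() if n == max_connects)
-- ===== Notes on version B (the rewrite author's own statement) =====
-- stated objective: alternative
-- what changed: A's two passes (discover the 2-hop candidate set, then for each candidate re-scan its adjacency to count mutual friends) are fused into one nested pass from the user's side that increments a counter keyed by the 2-hop neighbour, relying on symmetry of the adjacency relation; the result is the sorted filter of that counter at its maximum.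
import Mathlib
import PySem

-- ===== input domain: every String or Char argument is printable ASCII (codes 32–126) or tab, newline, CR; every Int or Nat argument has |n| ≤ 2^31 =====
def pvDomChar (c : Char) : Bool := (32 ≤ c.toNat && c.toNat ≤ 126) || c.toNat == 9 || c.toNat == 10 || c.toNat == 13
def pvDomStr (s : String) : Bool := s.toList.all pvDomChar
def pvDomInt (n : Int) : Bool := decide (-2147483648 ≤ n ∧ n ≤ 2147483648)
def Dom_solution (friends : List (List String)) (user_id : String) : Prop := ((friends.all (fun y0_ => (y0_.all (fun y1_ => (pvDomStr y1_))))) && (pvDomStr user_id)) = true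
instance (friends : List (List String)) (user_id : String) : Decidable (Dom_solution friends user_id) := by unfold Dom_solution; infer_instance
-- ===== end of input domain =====

-- B fuses A's candidate-discovery pass and per-candidate counting pass into one nested pass
-- from the user's side (objective: alternative decomposition, same asymptotic cost).

-- ===== PORT A =====
-- f[0] / f[1] (Python raises IndexError on shorter rows; Pre_ excludes those inputs, the "" default is only a totality guard)
def pvG0 (f : List String) : String := PySem.List.pyGetD f 0 ""
def pvG1 (f : List String) : String := PySem.List.pyGetD f 1 ""

-- the body of A's (and B's, identical in Source B) adjacency-building loop
def pvStep (adj : PySem.Dict String (PySem.Set String)) (f : List String) : PySem.Dict String (PySem.Set String) :=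
  let adj1 := if adj.contains (pvG0 f) then adj else adj.insert (pvG0 f) PySem.Set.empty
  let adj2 := if adj1.contains (pvG1 f) then adj1 else adj1.insert (pvG1 f) PySem.Set.empty
  let adj3 := adj2.modify (pvG0 f) PySem.Set.empty (fun s => s.add (pvG1 f))
  adj3.modify (pvG1 f) PySem.Set.empty (fun s => s.add (pvG0 f))

def pvBuildAdj (friends : List (List String)) : PySem.Dict String (PySem.Set String) :=
  friends.foldl pvStep PySem.Dict.empty

def solution (friends : List (List String)) (user_id : String) : List String :=
  let adj := pvBuildAdj friends
  -- adj[user_id] (Python raises KeyError when user_id is absent; Pre_ excludes that, empty set is a totality guard)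
  let adjU := adj.getD user_id PySem.Set.empty
  let candidates : PySem.Set String :=
    adjU.foldl (fun cand f =>
      (adj.getD f PySem.Set.empty).foldl (fun cand f2 =>
        if f2 != user_id && !(PySem.Set.contains adjU f2) then cand.add f2 else cand) cand)
      PySem.Set.empty
  let n0 : PySem.Dict String Int :=
    candidates.foldl (fun d c => d.insert c 0) PySem.Dict.empty
  let nc : PySem.Dict String Int :=
    candidates.foldl (fun d c =>
      (adj.getD c PySem.Set.empty).foldl (fun d f =>
        if PySem.Set.contains adjU f then d.modify c 0 (fun n => n + 1) else d) d) n0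
  match PySem.List.max? nc.values (fun v => v) with
  | none => []          -- Python raises ValueError (max of an empty sequence); Pre_ excludes that
  | some m =>
      let answer := nc.items.foldl (fun acc p => if p.2 == m then acc ++ [p.1] else acc) []
      PySem.List.sorted answer (fun x => x) false

-- ===== PORT B =====
def solution_alt (friends : List (List String)) (user_id : String) : List String :=
  let adj := pvBuildAdj friends
  let adjU := adj.getD user_id PySem.Set.empty
  -- one fused pass: discover 2-hop candidates and count mutual friends at the same time
  let counter : PySem.Dict String Int :=
    adjU.foldl (fun d f =>
      (adj.getD f PySem.Set.empty).foldl (fun d f2 =>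
        if f2 != user_id && !(PySem.Set.contains adjU f2) then d.insert f2 (d.getD f2 0 + 1) else d) d)
      PySem.Dict.empty
  match PySem.List.max? counter.values (fun v => v) with
  | none => []
  | some m =>
      PySem.List.sorted ((counter.items.filter (fun p => p.2 == m)).map (fun p => p.1)) (fun x => x) false

-- ===== PRECONDITION & SPEC =====
-- closed-form "a and b are friends according to the input list"
def pvEdgeB (friends : List (List String)) (a b : String) : Bool :=
  friends.any (fun f => (pvG0 f == a && pvG1 f == b) || (pvG0 f == b && pvG1 f == a))

def pvNames (friends : List (List String)) : List String :=
  friends.flatMap (fun f => [pvG0 f, pvG1 f])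

-- Pre_ = exactly where Python A returns: every row has ≥ 2 entries (else IndexError),
-- user_id occurs in some row (else KeyError), and some strict 2-hop neighbour exists
-- (else ValueError from max() on an empty sequence).
def Pre_solution (friends : List (List String)) (user_id : String) : Prop :=
  (∀ f ∈ friends, 2 ≤ f.length) ∧
  (friends.any (fun f => pvG0 f == user_id || pvG1 f == user_id) = true) ∧
  ((pvNames friends).any (fun v =>
     v != user_id && !(pvEdgeB friends user_id v) &&
     (pvNames friends).any (fun w => pvEdgeB friends user_id w && pvEdgeB friends w v)) = true)

instance (friends : List (List String)) (user_id : String) : Decidable (Pre_solution friends user_id) := by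
  unfold Pre_solution; infer_instance

def pvWitness_solution : List (List String) × String := ([["a", "b"], ["b", "c"]], "a")

def Spec_solution (friends : List (List String)) (user_id : String) (out : List String) : Prop :=
  out = solution_alt friends user_id
instance (friends : List (List String)) (user_id : String) (out : List String) : Decidable (Spec_solution friends user_id out) := by
  unfold Spec_solution; infer_instance

-- ===== CLAIM (what is proved, stated in full; the proofs are below) =====
def Claim_equal_solution : Prop := ∀ (friends : List (List String)) (user_id : String), Dom_solution friends user_id → Pre_solution friends user_id → Spec_solution friends user_id (solution friends user_id)

-- ===== LEMMAS AND PROOFS =====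

-- the "if key not in adj: adj[key] = set()" padding never changes a getD with the empty default
lemma pvPad_getD (d : PySem.Dict String (PySem.Set String)) (x a : String) :
    ((if d.contains x then d else d.insert x PySem.Set.empty).getD a PySem.Set.empty)
      = d.getD a PySem.Set.empty := by
  split_ifs with h
  · rfl
  · rw [PySem.Dict.getD_insert]
    split_ifs with h2
    · subst h2
      rw [PySem.Dict.getD_of_not_contains _ _ (by simpa using h)]
    · rfl

-- membership in an adjacency set after one step of the building loop
lemma pvStep_mem (d : PySem.Dict String (PySem.Set String)) (f : List String) (a b : String) :
    b ∈ (pvStep d f).getD a PySem.Set.empty ↔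
      b ∈ d.getD a PySem.Set.empty ∨ (pvG0 f = a ∧ pvG1 f = b) ∨ (pvG1 f = a ∧ pvG0 f = b) := by
  unfold pvStep
  simp only [PySem.Dict.getD_modify, pvPad_getD]
  split_ifs with h1 h2 h2 <;>
    simp [PySem.Set.mem_add, h1, h2] <;> aesop

lemma pvBuild_mem (friends : List (List String)) (d : PySem.Dict String (PySem.Set String)) (a b : String) :
    b ∈ (friends.foldl pvStep d).getD a PySem.Set.empty ↔
      b ∈ d.getD a PySem.Set.empty ∨
        ∃ f ∈ friends, (pvG0 f = a ∧ pvG1 f = b) ∨ (pvG1 f = a ∧ pvG0 f = b) := by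
  induction friends generalizing d with
  | nil => simp
  | cons f t ih =>
    rw [List.foldl_cons, ih, pvStep_mem]
    simp only [List.mem_cons]
    constructor
    · rintro ((h | h) | h)
      · exact Or.inl h
      · exact Or.inr ⟨f, Or.inl rfl, h⟩
      · rcases h with ⟨g, hg, hgs⟩
        exact Or.inr ⟨g, Or.inr hg, hgs⟩
    · rintro (h | ⟨g, (rfl | hg), hgs⟩)
      · exact Or.inl (Or.inl h)
      · exact Or.inl (Or.inr hgs)
      · exact Or.inr ⟨g, hg, hgs⟩

-- the adjacency relation built by the loop is symmetric
lemma pvAdj_symm (friends : List (List String)) (a b : String) :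
    b ∈ (pvBuildAdj friends).getD a PySem.Set.empty ↔ a ∈ (pvBuildAdj friends).getD b PySem.Set.empty := by
  unfold pvBuildAdj
  rw [pvBuild_mem, pvBuild_mem]
  simp [PySem.Dict.getD_empty]
  constructor <;> · rintro ⟨g, hg, hgs⟩; exact ⟨g, hg, by tauto⟩

lemma pvStep_nodup (d : PySem.Dict String (PySem.Set String)) (f : List String)
    (h : ∀ a, (d.getD a PySem.Set.empty).Nodup) (a : String) :
    ((pvStep d f).getD a PySem.Set.empty).Nodup := by
  unfold pvStep
  simp only [PySem.Dict.getD_modify, pvPad_getD]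
  split_ifs <;> solve
    | exact PySem.Set.nodup_add _ _ (PySem.Set.nodup_add _ _ (h _))
    | exact PySem.Set.nodup_add _ _ (h _)
    | exact h _

lemma pvAdj_nodup (friends : List (List String)) (a : String) :
    ((pvBuildAdj friends).getD a PySem.Set.empty).Nodup := by
  suffices h : ∀ (d : PySem.Dict String (PySem.Set String)),
      (∀ x, (d.getD x PySem.Set.empty).Nodup) → ∀ x,
      ((friends.foldl pvStep d).getD x PySem.Set.empty).Nodup by
    exact h PySem.Dict.empty (fun x => by simp [PySem.Dict.getD_empty]) a
  induction friends with
  | nil => intro d hd x; simpa using hd x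
  | cons f t ih =>
    intro d hd x
    rw [List.foldl_cons]
    exact ih (pvStep d f) (pvStep_nodup d f hd) x

-- |xs ∩ ys| = |ys ∩ xs| for duplicate-free lists
lemma pvFilter_mem_comm (xs ys : List String) (hx : xs.Nodup) (hy : ys.Nodup) :
    (xs.filter (fun a => a ∈ ys)).length = (ys.filter (fun a => a ∈ xs)).length := by
  have key : ∀ (us vs : List String), us.Nodup →
      (us.filter (fun a => a ∈ vs)).length = (us.toFinset ∩ vs.toFinset).card := by
    intro us vs hus
    rw [← List.toFinset_card_of_nodup (List.Nodup.filter _ hus)]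
    congr 1
    rw [List.toFinset_filter]
    ext z
    simp
  rw [key xs ys hx, key ys xs hy, Finset.inter_comm]

-- Set.update by elements already present does nothing
lemma pvUpdate_self (s : PySem.Set String) (l : List String) (h : ∀ x ∈ l, x ∈ s) :
    PySem.Set.update s l = s := by
  induction l generalizing s with
  | nil => rfl
  | cons x t ih =>
    have hx : PySem.Set.add s x = s := by
      unfold PySem.Set.add
      rw [if_pos]
      exact List.elem_eq_true_of_mem (h x (by simp))
    show PySem.Set.update (PySem.Set.add s x) t = s
    rw [hx]
    exact ih s (fun y hy => h y (by simp [hy]))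

lemma pvSum_ite (C : List String) (c : String) (g : String → Nat) (hnd : C.Nodup) (hc : c ∈ C) :
    (C.map (fun c' => if c = c' then g c' else 0)).sum = g c := by
  induction C with
  | nil => simp at hc
  | cons x t ih =>
    rcases List.mem_cons.mp hc with rfl | hct
    · have hnx : c ∉ t := (List.nodup_cons.mp hnd).1
      have : (t.map (fun c' => if c = c' then g c' else 0)).sum = 0 := by
        apply List.sum_eq_zero
        intro y hy
        rcases List.mem_map.mp hy with ⟨z, hz, rfl⟩
        rw [if_neg]
        rintro rfl
        exact hnx hz
      simp [this]
    · have hxc : ¬ c = x := by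
        rintro rfl
        exact (List.nodup_cons.mp hnd).1 hct
      simp only [List.map_cons, List.sum_cons, if_neg hxc, Nat.zero_add]
      exact ih (List.nodup_cons.mp hnd).2 hct

-- indicator sums are filter lengths
lemma pvSum_indicator (l : List String) (p : String → Prop) [DecidablePred p] :
    (l.map (fun x => if p x then 1 else 0)).sum = (l.filter (fun x => decide (p x))).length := by
  induction l with
  | nil => simp
  | cons x t ih =>
    by_cases h : p x <;> simp [h, ih, Nat.add_comm]

-- the heart of the equivalence: A's candidate dictionary (init-to-0 pass + per-candidate
-- counting pass) IS B's fused counter, thanks to symmetry of the adjacency sets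
lemma pvCore (adj : PySem.Dict String (PySem.Set String)) (user_id : String)
    (hsym : ∀ a b, b ∈ adj.getD a ([] : PySem.Set String) ↔ a ∈ adj.getD b ([] : PySem.Set String))
    (hnd : ∀ a, (adj.getD a ([] : PySem.Set String)).Nodup) :
    (List.foldl (fun d c =>
        List.foldl (fun d f =>
            if PySem.Set.contains (adj.getD user_id PySem.Set.empty) f then d.modify c 0 (fun n => n + 1) else d)
          d (adj.getD c PySem.Set.empty))
      (List.foldl (fun d c => d.insert c 0) (PySem.Dict.empty : PySem.Dict String Int)
        (List.foldl (fun cand f =>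
            List.foldl (fun cand f2 =>
                if f2 != user_id && !(PySem.Set.contains (adj.getD user_id PySem.Set.empty) f2) then PySem.Set.add cand f2 else cand)
              cand (adj.getD f PySem.Set.empty))
          PySem.Set.empty (adj.getD user_id PySem.Set.empty)))
      (List.foldl (fun cand f =>
          List.foldl (fun cand f2 =>
              if f2 != user_id && !(PySem.Set.contains (adj.getD user_id PySem.Set.empty) f2) then PySem.Set.add cand f2 else cand)
            cand (adj.getD f PySem.Set.empty))
        PySem.Set.empty (adj.getD user_id PySem.Set.empty))) =
    (List.foldl (fun d f =>
        List.foldl (fun d f2 =>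
            if f2 != user_id && !(PySem.Set.contains (adj.getD user_id PySem.Set.empty) f2) then d.insert f2 (d.getD f2 0 + 1) else d)
          d (adj.getD f PySem.Set.empty))
      (PySem.Dict.empty : PySem.Dict String Int) (adj.getD user_id PySem.Set.empty)) := by
  have hflat : ∀ {γ : Type} (g : γ → String → γ) (h : String → List String) (l : List String) (init : γ),
      l.foldl (fun acc x => (h x).foldl g acc) init = (l.flatMap h).foldl g init := by
    intro γ g h l init
    rw [List.foldl_flatMap]
  have hseg : ∀ (c : String) (lst : List String) (d : PySem.Dict String Int),
      List.foldl (fun d (_ : String) => d.modify c 0 (fun n => n + 1)) d lst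
        = List.foldl (fun d x => d.modify x 0 (fun n => n + 1)) d (lst.map (fun _ => c)) := by
    intro c lst d
    rw [List.foldl_map]
  simp only [PySem.List.foldl_if_eq_foldl_filter, hseg, hflat]
  rw [show (PySem.Set.empty : PySem.Set String) = [] from rfl, ← PySem.Set.ofList_eq_foldl,
    PySem.Dict.foldl_insert_getD_add_one_eq_counter]
  set U : PySem.Set String := adj.getD user_id ([] : PySem.Set String) with hU
  set pB : String → Bool := fun f2 => f2 != user_id && !(PySem.Set.contains U f2) with hpB
  set q : String → Bool := PySem.Set.contains U with hq
  set L : List String := U.flatMap (fun f => List.filter pB (adj.getD f ([] : PySem.Set String))) with hL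
  set C : List String := PySem.Set.ofList L with hC
  set M : List String := C.flatMap (fun c => List.map (fun _ => c) (List.filter q (adj.getD c ([] : PySem.Set String)))) with hM
  set n0 : PySem.Dict String Int := List.foldl (fun d c => d.insert c 0) PySem.Dict.empty C with hn0
  have hCnd : C.Nodup := PySem.Set.nodup_ofList L
  have hn0items : n0.items = C.map (fun c => (c, (0 : Int))) := by
    rw [hn0]
    have h := PySem.Dict.items_foldl_insert_fresh (l := C) (k := fun c => c) (v := fun _ => (0 : Int))
      (d := PySem.Dict.empty) (fun a _ => PySem.Dict.contains_empty a) (by simpa using hCnd)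
    simpa using h
  have hn0keys : n0.keys = C := by
    simp [PySem.Dict.keys, hn0items, List.map_map, Function.comp_def]
  have hMC : ∀ x ∈ M, x ∈ C := by
    intro x hx
    rcases List.mem_flatMap.mp hx with ⟨c, hc, hxc⟩
    rcases List.mem_map.mp hxc with ⟨_, _, rfl⟩
    exact hc
  have hnckeys : (List.foldl (fun d x => d.modify x 0 (fun n => n + 1)) n0 M).keys = C := by
    simp only [PySem.Dict.keys_foldl_modify, hn0keys]
    exact pvUpdate_self C M hMC
  apply PySem.Dict.ext
  rw [PySem.Dict.items_counter, ← hC,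
    PySem.Dict.items_eq_map_keys _ (by rw [hnckeys]; exact hCnd) 0, hnckeys]
  apply List.map_congr_left
  intro c hc
  have hn0getD : n0.getD c 0 = 0 :=
    PySem.Dict.getD_of_mem_items n0 (by rw [hn0items]; exact List.mem_map_of_mem hc)
      (by rw [hn0keys]; exact hCnd) 0
  rw [PySem.Dict.getD_foldl_modify_add_one M n0 c, hn0getD, zero_add]
  congr 1
  -- A's count at c equals the length of c's adjacency filtered to the user's friends …
  have hMcount : M.count c = ((adj.getD c ([] : PySem.Set String)).filter q).length := by
    rw [hM, List.count_flatMap]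
    calc (C.map (List.count c ∘ fun c' => List.map (fun _ => c') (List.filter q (adj.getD c' ([] : PySem.Set String))))).sum
        = (C.map (fun c' => if c = c' then ((adj.getD c' ([] : PySem.Set String)).filter q).length else 0)).sum := by
          apply congrArg
          apply List.map_congr_left
          intro c' _
          by_cases hcc : c = c'
          · subst hcc
            simp [List.map_const']
          · simp [List.map_const', List.count_replicate, hcc, Ne.symm hcc]
      _ = ((adj.getD c ([] : PySem.Set String)).filter q).length :=
          pvSum_ite C c _ hCnd hc
  -- … and so does B's count at c, via symmetry of adj and the two-sided intersection count
  have hcL : c ∈ L := (PySem.Set.mem_ofList L c).mp hc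
  have hPc : pB c = true := by
    rcases List.mem_flatMap.mp hcL with ⟨f, _, hcf⟩
    exact List.of_mem_filter hcf
  have hLcount : L.count c = ((adj.getD c ([] : PySem.Set String)).filter q).length := by
    rw [hL, List.count_flatMap]
    calc (U.map (List.count c ∘ fun f => List.filter pB (adj.getD f ([] : PySem.Set String)))).sum
        = (U.map (fun f => if f ∈ adj.getD c ([] : PySem.Set String) then 1 else 0)).sum := by
          apply congrArg
          apply List.map_congr_left
          intro f _
          simp only [Function.comp_apply, List.count_filter hPc]
          rw [List.Nodup.count (hnd f)]
          simp only [hsym f c]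
      _ = (U.filter (fun f => decide (f ∈ adj.getD c ([] : PySem.Set String)))).length :=
          pvSum_indicator U _
      _ = ((adj.getD c ([] : PySem.Set String)).filter (fun a => decide (a ∈ U))).length :=
          pvFilter_mem_comm U (adj.getD c ([] : PySem.Set String)) (hnd user_id) (hnd c)
      _ = ((adj.getD c ([] : PySem.Set String)).filter q).length := by
          apply congrArg
          apply List.filter_congr
          intro a _
          rw [hq]
          exact (List.contains_eq_mem a U).symm
  rw [hMcount, hLcount]
-- ===== VERDICT (by name: the statement is the Claim_ definition above) =====
theorem solution_spec : Claim_equal_solution := by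
  intro friends user_id _ _
  unfold Spec_solution
  simp only [solution, solution_alt]
  have h := pvCore (pvBuildAdj friends) user_id (pvAdj_symm friends) (pvAdj_nodup friends)
  simp only at h
  rw [h]
  rcases hmax : PySem.List.max? _ (fun v => (v : Int)) with _ | m
  · rfl
  · simp only [PySem.List.foldl_append_if (fun p : String × Int => p.2 == m) (fun p => p.1),
      List.nil_append]
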